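-- pv_equiv track=rewrite | github.com/AndreaLK3/LAQP_code_final | Create_PQs/MyRAKE.py | getCandidateKeywords
-- ===== SOURCE A (Python) =====
-- def getCandidateKeywords(coded_ls):
--     candidates = []
--     candidate = []
--     for tuple in coded_ls:
--         label = tuple[0]
--         word = tuple[1]
--         if label == 0:
--             candidate.append(word)
--         if label == 1:
--             if len(candidate) > 0:
--                 candidates.append(candidate)
--             candidate = []
--     if len(candidate) > 0:
--         candidates.append(candidate)
--     return candidates
-- ===== SOURCE B (Python) =====
-- def getCandidateKeywords(coded_ls):
--     SENTINEL = object()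
--     tokens = []
--     for t in coded_ls:
--         if t[0] == 0:
--             tokens.append(t[1])
--         elif t[0] == 1:
--             tokens.append(SENTINEL)
--     groups = []
--     cur = []
--     for tok in tokens:
--         if tok is SENTINEL:
--             if cur:
--                 groups.append(cur)
--             cur = []
--         else:
--             cur.append(tok)
--     if cur:
--         groups.append(cur)
--     return groups
-- ===== Notes on version B (the rewrite author's own statement) =====
-- stated objective: alternative
-- what changed: Replaces A's single inline append-or-flush loop with a two-phase tokenize-then-split decomposition: first build a token list (word for label 0, a fresh sentinel for label 1, others skipped), then split that list at sentinels, dropping empty groups.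
import Mathlib
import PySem

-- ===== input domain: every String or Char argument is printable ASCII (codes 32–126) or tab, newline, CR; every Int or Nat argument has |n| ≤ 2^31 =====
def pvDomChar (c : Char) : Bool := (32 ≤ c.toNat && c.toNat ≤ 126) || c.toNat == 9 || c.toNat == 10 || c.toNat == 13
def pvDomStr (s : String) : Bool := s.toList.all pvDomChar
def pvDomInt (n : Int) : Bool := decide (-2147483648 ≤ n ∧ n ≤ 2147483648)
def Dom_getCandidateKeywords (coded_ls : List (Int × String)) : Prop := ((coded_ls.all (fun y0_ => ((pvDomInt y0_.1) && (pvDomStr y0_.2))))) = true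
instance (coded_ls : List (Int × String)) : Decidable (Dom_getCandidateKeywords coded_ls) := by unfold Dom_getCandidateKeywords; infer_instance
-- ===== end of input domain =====

-- B replaces A's inline append-or-flush loop by a tokenize-then-split decomposition (alternative, same cost).
-- ===== PORT A =====
-- one loop iteration of A: maybe append the word, maybe flush the candidate
def stepA (st : List (List String) × List String) (t : Int × String) : List (List String) × List String :=
  let st1 := if t.1 = 0 then (st.1, st.2 ++ [t.2]) else st
  if t.1 = 1 then (if st1.2.length > 0 then (st1.1 ++ [st1.2], ([] : List String)) else (st1.1, [])) else st1

def getCandidateKeywords (coded_ls : List (Int × String)) : List (List String) :=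
  let st := coded_ls.foldl stepA ([], [])
  if st.2.length > 0 then st.1 ++ [st.2] else st.1

-- ===== PORT B =====
-- phase 1 of B: build the token list (some word for label 0, none as the sentinel for label 1, skip otherwise)
def tokenizeB : List (Int × String) → List (Option String)
  | [] => []
  | t :: rest =>
    if t.1 = 0 then some t.2 :: tokenizeB rest
    else if t.1 = 1 then none :: tokenizeB rest
    else tokenizeB rest

-- phase 2 of B: one iteration of the split loop
def stepB (st : List (List String) × List String) (tok : Option String) : List (List String) × List String :=
  match tok with
  | none => if st.2.length > 0 then (st.1 ++ [st.2], ([] : List String)) else (st.1, [])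
  | some w => (st.1, st.2 ++ [w])

def getCandidateKeywords_alt (coded_ls : List (Int × String)) : List (List String) :=
  let st := (tokenizeB coded_ls).foldl stepB ([], [])
  if st.2.length > 0 then st.1 ++ [st.2] else st.1

-- ===== PRECONDITION & SPEC =====
def Spec_getCandidateKeywords (coded_ls : List (Int × String)) (out : List (List String)) : Prop := out = getCandidateKeywords_alt coded_ls
instance (coded_ls : List (Int × String)) (out : List (List String)) : Decidable (Spec_getCandidateKeywords coded_ls out) := by unfold Spec_getCandidateKeywords; infer_instance

-- ===== CLAIM (what is proved, stated in full; the proofs are below) =====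
def Claim_equal_getCandidateKeywords : Prop := ∀ (coded_ls : List (Int × String)), Dom_getCandidateKeywords coded_ls → Spec_getCandidateKeywords coded_ls (getCandidateKeywords coded_ls)

-- ===== LEMMAS AND PROOFS =====
theorem foldl_stepA_eq (l : List (Int × String)) (st : List (List String) × List String) :
    l.foldl stepA st = (tokenizeB l).foldl stepB st := by
  induction l generalizing st with
  | nil => rfl
  | cons t rest ih =>
    by_cases h0 : t.1 = 0
    · have h1 : t.1 ≠ 1 := by omega
      simp [tokenizeB, stepA, stepB, h0, List.foldl_cons, ih]
    · by_cases h1 : t.1 = 1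
      · simp [tokenizeB, stepA, stepB, h1, List.foldl_cons, ih]
      · simp [tokenizeB, stepA, h0, h1, List.foldl_cons, ih]

-- ===== VERDICT (by name: the statement is the Claim_ definition above) =====
theorem getCandidateKeywords_spec : Claim_equal_getCandidateKeywords := by
  intro l _
  unfold Spec_getCandidateKeywords getCandidateKeywords getCandidateKeywords_alt
  rw [foldl_stepA_eq]
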